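-- pv_equiv track=rewrite | github.com/lciga/UralCUP-2025-Writeups | tasks/forensic/Евро_Тур/src/dns_tun.py | safe_segments_per_qname
-- ===== SOURCE A (Python) =====
-- def safe_segments_per_qname(zone: str, seg_size: int, desired: int, seq_width=5) -> int:
--     """
--     Подбирает безопасное кол-во data-лейблов в одном QNAME с учётом лимита ~253 символа.
--     """
--     zone = zone.rstrip('.')  # без финальной точки для текстовой длины
--     seg_size = max(1, min(63, seg_size))
--     # пробуем от desired вниз, пока влезаем
--     for k in range(desired, 0, -1):
--         labels = ['0'*seq_width] + ['A'*seg_size]*k + [zone]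
--         qname = '.'.join(labels)  # текстовая форма без trailing dot
--         if len(qname) <= 250:     # запас к 253
--             return k
--     return 1
-- ===== SOURCE B (Python) =====
-- def safe_segments_per_qname(zone: str, seg_size: int, desired: int, seq_width=5) -> int:
--     """Closed-form: the QNAME text length with k data labels is
--     len('0'*seq_width) + 1 + k*(seg+1) + len(zone), so the answer is
--     min(desired, budget // (seg+1)) clamped up to 1."""
--     zone = zone.rstrip('.')
--     seg = max(1, min(63, seg_size))
--     budget = 249 - max(0, seq_width) - len(zone)
--     return max(1, min(desired, budget // (seg + 1)))
-- ===== Notes on version B (the rewrite author's own statement) =====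
-- stated objective: faster
-- what changed: replaces the countdown loop that rebuilds and joins the whole QNAME string for each candidate k by a closed-form floor division on the length budget
import Mathlib
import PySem

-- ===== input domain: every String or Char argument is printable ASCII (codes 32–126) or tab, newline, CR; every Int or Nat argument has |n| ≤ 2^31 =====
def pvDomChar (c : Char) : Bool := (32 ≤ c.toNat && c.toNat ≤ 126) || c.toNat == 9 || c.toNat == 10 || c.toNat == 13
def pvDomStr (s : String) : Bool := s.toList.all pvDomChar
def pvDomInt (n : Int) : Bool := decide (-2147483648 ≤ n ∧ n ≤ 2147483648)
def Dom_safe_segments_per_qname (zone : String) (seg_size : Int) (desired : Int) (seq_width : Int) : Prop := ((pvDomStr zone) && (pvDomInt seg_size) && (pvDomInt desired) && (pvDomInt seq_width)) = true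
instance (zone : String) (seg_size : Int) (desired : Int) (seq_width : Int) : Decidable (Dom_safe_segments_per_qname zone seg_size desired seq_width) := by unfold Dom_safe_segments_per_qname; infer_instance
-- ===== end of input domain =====

-- B replaces A's countdown loop (which rebuilds and joins the whole QNAME for each candidate k)
-- by a closed-form floor division on the length budget; proved equal on all inputs.

-- hand port of Python's zone.rstrip('.') (single-char strip set; exact: drops exactly the
-- trailing '.' characters), shared by both ports
def rstripDots (cs : List Char) : List Char := (cs.reverse.dropWhile (· == '.')).reverse

-- ===== PORT A =====
def safe_segments_per_qname (zone : String) (seg_size : Int) (desired : Int) (seq_width : Int) : Int :=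
  let zoneC := rstripDots zone.toList
  let seg := max 1 (min 63 seg_size)
  -- for k in range(desired, 0, -1): build labels, join, test length; first hit returned, else 1
  match (PySem.List.pyRange desired 0 (-1)).find?
      (fun k => decide ((PySem.Chars.join ['.']
        ([List.replicate seq_width.toNat '0']
          ++ List.replicate k.toNat (List.replicate seg.toNat 'A')
          ++ [zoneC])).length ≤ 250)) with
  | some k => k
  | none => 1

-- ===== PORT B =====
def safe_segments_per_qname_alt (zone : String) (seg_size : Int) (desired : Int) (seq_width : Int) : Int :=
  let zoneC := rstripDots zone.toList
  let seg := max 1 (min 63 seg_size)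
  let budget : Int := 249 - max 0 seq_width - (zoneC.length : Int)
  max 1 (min desired (PySem.Int.floordiv budget (seg + 1)))

-- ===== PRECONDITION & SPEC =====
def Spec_safe_segments_per_qname (zone : String) (seg_size : Int) (desired : Int) (seq_width : Int) (out : Int) : Prop := out = safe_segments_per_qname_alt zone seg_size desired seq_width
instance (zone : String) (seg_size : Int) (desired : Int) (seq_width : Int) (out : Int) : Decidable (Spec_safe_segments_per_qname zone seg_size desired seq_width out) := by unfold Spec_safe_segments_per_qname; infer_instance

-- ===== CLAIM (what is proved, stated in full; the proofs are below) =====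
def Claim_equal_safe_segments_per_qname : Prop := ∀ (zone : String) (seg_size : Int) (desired : Int) (seq_width : Int), Dom_safe_segments_per_qname zone seg_size desired seq_width → Spec_safe_segments_per_qname zone seg_size desired seq_width (safe_segments_per_qname zone seg_size desired seq_width)

-- ===== LEMMAS AND PROOFS =====

-- length of '.'-join of k copies of lab followed by the zone label
lemma join_replicate_len (lab zc : List Char) (k : Nat) :
    (PySem.Chars.join ['.'] (List.replicate k lab ++ [zc])).length
      = k * (lab.length + 1) + zc.length := by
  induction k with
  | zero => simp [PySem.Chars.join_singleton]
  | succ n ih =>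
      have h : List.replicate (n+1) lab ++ [zc] = lab :: (List.replicate n lab ++ [zc]) := by
        simp [List.replicate_succ]
      rw [h]
      cases hrep : List.replicate n lab ++ [zc] with
      | nil => simp at hrep
      | cons y ys =>
          rw [PySem.Chars.join_cons_cons]
          rw [← hrep]
          simp [List.length_append, ih]; ring

-- the QNAME text length that A's loop body computes at candidate k
lemma qname_len (w : Nat) (lab zc : List Char) (k : Nat) :
    (PySem.Chars.join ['.'] ([List.replicate w '0'] ++ List.replicate k lab ++ [zc])).length
      = w + 1 + k * (lab.length + 1) + zc.length := by
  cases hrep : List.replicate k lab ++ [zc] with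
  | nil => simp at hrep
  | cons y ys =>
      have : [List.replicate w '0'] ++ List.replicate k lab ++ [zc]
           = List.replicate w '0' :: (y :: ys) := by simp [← hrep]
      rw [this, PySem.Chars.join_cons_cons, ← hrep]
      simp [List.length_append, join_replicate_len]; ring

-- A's descending search over range(a, 0, -1) for the first k with k ≤ K
lemma find_desc (p : Int → Bool) (K a : Int) (ha : 0 ≤ a)
    (hp : ∀ k : Int, 1 ≤ k → (p k = decide (k ≤ K))) :
    ((PySem.List.pyRange a 0 (-1)).find? p) =
      if a ≤ K then (if 1 ≤ a then some a else none)
      else if 1 ≤ K then some K else none := by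
  obtain ⟨n, rfl⟩ : ∃ n : Nat, a = (n : Int) := ⟨a.toNat, (Int.toNat_of_nonneg ha).symm⟩
  clear ha
  induction n with
  | zero => simp [PySem.List.pyRange_neg_one_eq_nil]
            omega
  | succ m ih =>
      rw [PySem.List.pyRange_neg_one_cons (by exact_mod_cast Nat.succ_pos m)]
      have hp' := hp ((m+1 : Nat) : Int) (by exact_mod_cast Nat.succ_le_succ (Nat.zero_le m))
      by_cases hk : ((m+1 : Nat) : Int) ≤ K
      · rw [List.find?_cons_of_pos (h := by rw [hp']; exact decide_eq_true hk)]
        rw [if_pos hk, if_pos (by exact_mod_cast Nat.succ_le_succ (Nat.zero_le m))]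
      · rw [List.find?_cons_of_neg (h := by rw [hp']; simpa using hk)]
        have he : ((m+1 : Nat) : Int) - 1 = (m : Int) := by push_cast; ring
        rw [he, ih]
        split_ifs <;> first | rfl | omega | (congr 1; omega)

-- ===== VERDICT (by name: the statement is the Claim_ definition above) =====
theorem safe_segments_per_qname_spec : Claim_equal_safe_segments_per_qname := by
  intro zone seg_size desired seq_width _
  unfold Spec_safe_segments_per_qname safe_segments_per_qname safe_segments_per_qname_alt
  dsimp only
  set zc := rstripDots zone.toList with hzc
  set seg : Int := max 1 (min 63 seg_size) with hseg
  have hseg1 : 1 ≤ seg := le_max_left _ _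
  set K : Int := PySem.Int.floordiv (249 - max 0 seq_width - (zc.length : Int)) (seg + 1) with hK
  have hKiff : ∀ k : Int, 1 ≤ k →
      ((decide ((PySem.Chars.join ['.']
        ([List.replicate seq_width.toNat '0']
          ++ List.replicate k.toNat (List.replicate seg.toNat 'A')
          ++ [zc])).length ≤ 250) : Bool) = decide (k ≤ K)) := by
    intro k hk1
    rw [qname_len]
    have hlab : (List.replicate seg.toNat 'A').length = seg.toNat := List.length_replicate
    rw [hlab]
    have hmul : k ≤ K ↔ k * (seg + 1) ≤ 249 - max 0 seq_width - (zc.length : Int) := by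
      rw [hK]
      have hpos : (0 : Int) < seg + 1 := by linarith [hseg1]
      exact PySem.Int.le_floordiv_iff_mul_le hpos
    have hw : (seq_width.toNat : Int) = max 0 seq_width := by rw [Int.toNat_eq_max, max_comm]
    have hs : (seg.toNat : Int) = seg := Int.toNat_of_nonneg (le_trans zero_le_one hseg1)
    have hkn : (k.toNat : Int) = k := Int.toNat_of_nonneg (le_trans zero_le_one hk1)
    have hlen : ((seq_width.toNat + 1 + k.toNat * (seg.toNat + 1) + zc.length : Nat) : Int)
        = max 0 seq_width + 1 + k * (seg + 1) + (zc.length : Int) := by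
      push_cast; rw [hw, hs, hkn]
    have : (seq_width.toNat + 1 + k.toNat * (seg.toNat + 1) + zc.length ≤ 250)
        ↔ (k ≤ K) := by
      rw [hmul]
      constructor
      · intro h
        have := hlen ▸ (by exact_mod_cast h : ((seq_width.toNat + 1 + k.toNat * (seg.toNat + 1) + zc.length : Nat) : Int) ≤ 250)
        omega
      · intro h
        have : ((seq_width.toNat + 1 + k.toNat * (seg.toNat + 1) + zc.length : Nat) : Int) ≤ 250 := by
          rw [hlen]; omega
        exact_mod_cast this
    simp [this]
  by_cases hd : 0 ≤ desired
  · rw [find_desc _ K desired hd hKiff]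
    split_ifs <;> simp <;> omega
  · rw [PySem.List.pyRange_neg_one_eq_nil (by omega)]
    simp
    omega
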